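-- pv_equiv track=rewrite | github.com/lostmyway02/CSE_318 | heuristics.py | heuristic_7
-- ===== SOURCE A (Python) =====
-- def heuristic_7(board, ai_player):
--     rows = len(board)
--     cols = len(board[0])
--     score = 0
--     edge_cells = []
--     corner_positions = [(0, 0), (0, cols - 1), (rows - 1, 0), (rows - 1, cols - 1)]
--
--
--     # Edge consists of top, bottom, left, right cloumns excluding corners
--     # Top & Bottom
--     for j in range(1, cols - 1):
--         edge_cells.append((0,j))
--         edge_cells.append((rows - 1, j))
--
--     # Left & Right
--     for i in range(1, rows-1):
--         edge_cells.append((i,0))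
--         edge_cells.append((i, cols -1))
--
--     for i in range(rows):
--         for j in range(cols):
--             count, owner = board[i][j]
--             if owner == ai_player:
--                 score += count  # base score for owning orbs
--
--                 if (i, j) in edge_cells:
--                     score += 1
--                 elif (i,j) in corner_positions:
--                     score += 2
--
--             elif owner and owner != ai_player:
--                 score -= count
--
--     return score
-- ===== SOURCE B (Python) =====
-- def heuristic_7(board, ai_player):
--     rows = len(board)
--     cols = len(board[0])
--     if cols == 0:
--         return 0
--     # Pass 1: base score = signed sum of orb counts over the whole grid.
--     base = 0
--     for row in board:
--         for count, owner in row[:cols]: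
--             if owner == ai_player:
--                 base += count
--             elif owner:
--                 base -= count
--     # Pass 2: positional bonus, computed over the boundary coordinates only.
--     edges = set()
--     for j in range(1, cols - 1):
--         edges.add((0, j))
--         edges.add((rows - 1, j))
--     for i in range(1, rows - 1):
--         edges.add((i, 0))
--         edges.add((i, cols - 1))
--     corners = {(0, 0), (0, cols - 1), (rows - 1, 0), (rows - 1, cols - 1)}
--     bonus = sum(1 for i, j in edges if board[i][j][1] == ai_player)
--     bonus += sum(2 for i, j in corners if board[i][j][1] == ai_player)
--     return base + bonus
-- ===== Notes on version B (the rewrite author's own statement) =====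
-- stated objective: alternative
-- what changed: B replaces A's single sweep (which classifies every cell by linear membership scans over precomputed edge/corner lists) with two staged passes: a whole-grid signed sum of orb counts, then a boundary-only bonus pass over deduplicated edge/corner coordinate sets, so the O(rows+cols) membership scan per cell disappears.
-- outside the precondition, e.g. on heuristic_7([], 0): A raises IndexError, B raises IndexError; on heuristic_7([[(1, 1), (2, 2)], [(3, 1)]], 1): A raises IndexError, B raises IndexError
import Mathlib
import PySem

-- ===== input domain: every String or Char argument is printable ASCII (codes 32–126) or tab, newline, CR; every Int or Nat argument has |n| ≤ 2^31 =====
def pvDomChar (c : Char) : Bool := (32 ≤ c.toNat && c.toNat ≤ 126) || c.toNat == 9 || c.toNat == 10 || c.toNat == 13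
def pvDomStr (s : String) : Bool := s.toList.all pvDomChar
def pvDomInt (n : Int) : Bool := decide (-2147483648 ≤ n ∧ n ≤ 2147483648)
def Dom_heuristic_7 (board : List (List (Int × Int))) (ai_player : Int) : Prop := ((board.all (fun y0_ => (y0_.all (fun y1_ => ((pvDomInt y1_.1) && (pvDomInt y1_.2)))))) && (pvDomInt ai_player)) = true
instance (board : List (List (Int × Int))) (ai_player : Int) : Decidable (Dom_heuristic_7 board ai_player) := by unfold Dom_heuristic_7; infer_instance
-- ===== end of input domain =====

-- B recomputes the score in two staged passes — a whole-grid signed sum of orb counts,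
-- then a boundary-only bonus pass over edge/corner coordinate sets — instead of A's
-- single sweep that classifies every cell by membership in precomputed coordinate lists.


-- ===== PORT A =====
def heuristic_7 (board : List (List (Int × Int))) (ai_player : Int) : Int :=
  let rows : Int := PySem.List.len board
  let cols : Int := PySem.List.len (PySem.List.pyGetD board 0 [])
  let corner_positions : List (Int × Int) :=
    [(0, 0), (0, cols - 1), (rows - 1, 0), (rows - 1, cols - 1)]
  -- Top & Bottom
  let edge_cells : List (Int × Int) :=
    (PySem.List.pyRange 1 (cols - 1)).foldl
      (fun ec j => ec ++ [((0 : Int), j), (rows - 1, j)]) []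
  -- Left & Right
  let edge_cells : List (Int × Int) :=
    (PySem.List.pyRange 1 (rows - 1)).foldl
      (fun ec i => ec ++ [(i, (0 : Int)), (i, cols - 1)]) edge_cells
  (PySem.List.pyRange 0 rows).foldl (fun score i =>
    (PySem.List.pyRange 0 cols).foldl (fun score j =>
      let cell := PySem.List.pyGetD (PySem.List.pyGetD board i []) j (0, 0)
      if cell.2 = ai_player then
        let score := score + cell.1
        if (i, j) ∈ edge_cells then score + 1
        else if (i, j) ∈ corner_positions then score + 2
        else score
      else if cell.2 ≠ 0 ∧ cell.2 ≠ ai_player then score - cell.1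
      else score) score) 0

-- ===== PORT B =====
def heuristic_7_alt (board : List (List (Int × Int))) (ai_player : Int) : Int :=
  let rows : Int := PySem.List.len board
  let cols : Int := PySem.List.len (PySem.List.pyGetD board 0 [])
  if cols = 0 then 0
  else
    -- Pass 1: base score = signed sum of orb counts over the whole grid.
    let base : Int := board.foldl (fun base row =>
      (PySem.List.slice row none (some cols)).foldl (fun base c =>
        if c.2 = ai_player then base + c.1
        else if c.2 ≠ 0 then base - c.1
        else base) base) 0
    -- Pass 2: positional bonus, computed over the boundary coordinates only.
    let edges : PySem.Set (Int × Int) :=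
      (PySem.List.pyRange 1 (cols - 1)).foldl
        (fun s j => PySem.Set.add (PySem.Set.add s ((0 : Int), j)) (rows - 1, j))
        PySem.Set.empty
    let edges : PySem.Set (Int × Int) :=
      (PySem.List.pyRange 1 (rows - 1)).foldl
        (fun s i => PySem.Set.add (PySem.Set.add s (i, (0 : Int))) (i, cols - 1)) edges
    let corners : PySem.Set (Int × Int) :=
      PySem.Set.ofList [((0 : Int), (0 : Int)), (0, cols - 1), (rows - 1, 0), (rows - 1, cols - 1)]
    let bonus : Int := edges.foldl (fun b p =>
      if (PySem.List.pyGetD (PySem.List.pyGetD board p.1 []) p.2 (0, 0)).2 = ai_player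
      then b + 1 else b) 0
    let bonus : Int := bonus + corners.foldl (fun b p =>
      if (PySem.List.pyGetD (PySem.List.pyGetD board p.1 []) p.2 (0, 0)).2 = ai_player
      then b + 2 else b) 0
    base + bonus

-- ===== PRECONDITION & SPEC =====
-- Pre_ excludes exactly the inputs where the Python A raises IndexError: the empty
-- board (board[0] fails) and boards with a row shorter than the first row
-- (board[i][j] fails for some j < cols).
def Pre_heuristic_7 (board : List (List (Int × Int))) (ai_player : Int) : Prop :=
  board ≠ [] ∧ ∀ row ∈ board, (board.headD []).length ≤ row.length
instance (board : List (List (Int × Int))) (ai_player : Int) : Decidable (Pre_heuristic_7 board ai_player) := by unfold Pre_heuristic_7; infer_instance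
def pvWitness_heuristic_7 : (List (List (Int × Int))) × Int :=
  ([[(1, 1), (2, 2)], [(3, 1), (0, 0)]], 1)

def Spec_heuristic_7 (board : List (List (Int × Int))) (ai_player : Int) (out : Int) : Prop := out = heuristic_7_alt board ai_player
instance (board : List (List (Int × Int))) (ai_player : Int) (out : Int) : Decidable (Spec_heuristic_7 board ai_player out) := by unfold Spec_heuristic_7; infer_instance

-- ===== CLAIM (what is proved, stated in full; the proofs are below) =====
def Claim_equal_heuristic_7 : Prop := ∀ (board : List (List (Int × Int))) (ai_player : Int), Dom_heuristic_7 board ai_player → Pre_heuristic_7 board ai_player → Spec_heuristic_7 board ai_player (heuristic_7 board ai_player)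

-- ===== LEMMAS AND PROOFS =====

-- The cell read at coordinate p, and the per-cell quantities both programs sum.
def pvCell (board : List (List (Int × Int))) (p : Int × Int) : Int × Int :=
  PySem.List.pyGetD (PySem.List.pyGetD board p.1 []) p.2 (0, 0)
def pvSgnC (ai : Int) (c : Int × Int) : Int :=
  if c.2 = ai then c.1 else if c.2 ≠ 0 then -c.1 else 0
def pvEdgeB (rows cols : Int) (p : Int × Int) : Bool :=
  ((p.1 == 0 || p.1 == rows - 1) && (decide (1 ≤ p.2) && decide (p.2 < cols - 1))) ||
  ((decide (1 ≤ p.1) && decide (p.1 < rows - 1)) && (p.2 == 0 || p.2 == cols - 1))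
def pvCornerB (rows cols : Int) (p : Int × Int) : Bool :=
  (p.1 == 0 || p.1 == rows - 1) && (p.2 == 0 || p.2 == cols - 1)

-- A's flattened edge list, the corner list, and the full coordinate grid.
def pvEdgeList (rows cols : Int) : List (Int × Int) :=
  (PySem.List.pyRange 1 (cols - 1)).flatMap (fun j => [((0 : Int), j), (rows - 1, j)]) ++
  (PySem.List.pyRange 1 (rows - 1)).flatMap (fun i => [(i, (0 : Int)), (i, cols - 1)])
def pvGrid (rows cols : Int) : List (Int × Int) :=
  (PySem.List.pyRange 0 rows).flatMap (fun i => (PySem.List.pyRange 0 cols).map (fun j => (i, j)))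

-- generic: a 0-padded sum over l is the sum over the filtered list
theorem pv_sum_map_if_filter {α : Type} (l : List α) (P : α → Bool) (f : α → Int) :
    (l.map (fun x => if P x then f x else 0)).sum = ((l.filter P).map f).sum := by
  induction l with
  | nil => rfl
  | cons x t ih => by_cases h : P x <;> simp [h, ih]

-- generic: sum of a function over a flatMap
theorem pv_sum_map_flatMap {α β : Type} (l : List α) (F : α → List β) (h : β → Int) :
    (((l.flatMap F).map h).sum) = (l.map (fun a => ((F a).map h).sum)).sum := by
  induction l with
  | nil => rfl
  | cons x t ih => simp [List.flatMap_cons, ih]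

-- B's double-add set loop is a Set.update with the flattened pair list
theorem pv_foldl_add2_eq_update {α : Type} [BEq α] (l : List Int) (f g : Int → α)
    (s : PySem.Set α) :
    l.foldl (fun s j => PySem.Set.add (PySem.Set.add s (f j)) (g j)) s =
    PySem.Set.update s (l.flatMap (fun j => [f j, g j])) := by
  induction l generalizing s with
  | nil => rfl
  | cons x t ih => simp [List.flatMap_cons, PySem.Set.update_cons, ih]

-- A's edge_cells accumulator loops, flattened.
theorem pv_edge_cells_eq (rows cols : Int) :
    (PySem.List.pyRange 1 (rows - 1)).foldl
      (fun ec i => ec ++ [(i, (0 : Int)), (i, cols - 1)])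
      ((PySem.List.pyRange 1 (cols - 1)).foldl
        (fun ec j => ec ++ [((0 : Int), j), (rows - 1, j)]) []) =
    pvEdgeList rows cols := by
  rw [PySem.List.foldl_append_eq_flatMap, PySem.List.foldl_append_eq_flatMap]
  simp [pvEdgeList]

-- membership in the flattened edge list, as arithmetic
theorem pv_mem_edgeList (rows cols i j : Int) :
    ((i, j) ∈ pvEdgeList rows cols) ↔ pvEdgeB rows cols (i, j) = true := by
  simp only [pvEdgeList, pvEdgeB, List.mem_append, List.mem_flatMap,
    PySem.List.mem_pyRange_one, List.mem_cons, List.not_mem_nil, or_false, Prod.mk.injEq,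
    Bool.or_eq_true, Bool.and_eq_true, beq_iff_eq, decide_eq_true_eq]
  constructor
  · rintro (⟨t, ht, (⟨hi, hj⟩ | ⟨hi, hj⟩)⟩ | ⟨t, ht, (⟨hi, hj⟩ | ⟨hi, hj⟩)⟩) <;>
      subst hi <;> subst hj <;> [exact Or.inl ⟨Or.inl rfl, ht⟩;
        exact Or.inl ⟨Or.inr rfl, ht⟩; exact Or.inr ⟨ht, Or.inl rfl⟩;
        exact Or.inr ⟨ht, Or.inr rfl⟩]
  · rintro (⟨(hi | hi), hj⟩ | ⟨hi, (hj | hj)⟩) <;> subst_vars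
    · exact Or.inl ⟨j, hj, Or.inl ⟨rfl, rfl⟩⟩
    · exact Or.inl ⟨j, hj, Or.inr ⟨rfl, rfl⟩⟩
    · exact Or.inr ⟨i, hi, Or.inl ⟨rfl, rfl⟩⟩
    · exact Or.inr ⟨i, hi, Or.inr ⟨rfl, rfl⟩⟩

theorem pv_mem_cornerList (rows cols i j : Int) :
    ((i, j) ∈ ([(0, 0), (0, cols - 1), (rows - 1, 0), (rows - 1, cols - 1)] : List (Int × Int)))
      ↔ pvCornerB rows cols (i, j) = true := by
  simp only [List.mem_cons, List.not_mem_nil, or_false, Prod.mk.injEq,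
    pvCornerB, Bool.and_eq_true, Bool.or_eq_true, beq_iff_eq]
  constructor
  · rintro (⟨h1, h2⟩ | ⟨h1, h2⟩ | ⟨h1, h2⟩ | ⟨h1, h2⟩) <;> subst_vars <;> simp
  · rintro ⟨(h1 | h1), (h2 | h2)⟩ <;> subst_vars <;> simp

theorem pv_mem_grid (rows cols : Int) (p : Int × Int) :
    p ∈ pvGrid rows cols ↔ (0 ≤ p.1 ∧ p.1 < rows) ∧ (0 ≤ p.2 ∧ p.2 < cols) := by
  obtain ⟨i, j⟩ := p
  simp only [pvGrid, List.mem_flatMap, List.mem_map, PySem.List.mem_pyRange_one,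
    Prod.mk.injEq]
  constructor
  · rintro ⟨a, ha, b, hb, rfl, rfl⟩; exact ⟨ha, hb⟩
  · rintro ⟨hi, hj⟩; exact ⟨i, hi, j, hj, rfl, rfl⟩

theorem pv_nodup_grid (rows cols : Int) : (pvGrid rows cols).Nodup := by
  unfold pvGrid
  rw [List.nodup_flatMap]
  refine ⟨fun i _ => ?_, ?_⟩
  · exact (PySem.List.nodup_pyRange_one 0 cols).map (fun a b h => by
      simpa using congrArg Prod.snd h)
  · refine (PySem.List.pairwise_lt_pyRange_one 0 rows).imp ?_
    intro a b hab p hp hq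
    simp only [List.mem_map] at hp hq
    obtain ⟨x, _, rfl⟩ := hp
    obtain ⟨y, _, hy⟩ := hq
    have := congrArg Prod.fst hy
    simp at this
    omega

-- sums over the grid restricted by a boundary predicate collapse to sums over a
-- deduplicated boundary list (same members, both without duplicates)
theorem pv_sum_grid_filter_eq {rows cols : Int} (P : Int × Int → Bool)
    (S : List (Int × Int)) (hS : S.Nodup)
    (hmem : ∀ p, p ∈ S ↔ ((0 ≤ p.1 ∧ p.1 < rows) ∧ (0 ≤ p.2 ∧ p.2 < cols)) ∧ P p = true)
    (f : Int × Int → Int) :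
    (((pvGrid rows cols).filter P).map f).sum = (S.map f).sum := by
  refine List.Perm.sum_eq (List.Perm.map f ?_)
  refine (List.perm_ext_iff_of_nodup ((pv_nodup_grid rows cols).filter P) hS).mpr ?_
  intro p
  rw [List.mem_filter, pv_mem_grid, hmem]


-- per-cell: A's branch structure equals base + split bonuses, with boundary tests as arithmetic
theorem pv_cellA (rows cols ai i j s : Int) (c : Int × Int) :
    (if c.2 = ai then
       (if pvEdgeB rows cols (i, j) = true then s + c.1 + 1
        else if pvCornerB rows cols (i, j) = true then s + c.1 + 2
        else s + c.1)
     else if c.2 ≠ 0 ∧ c.2 ≠ ai then s - c.1 else s) =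
    s + (pvSgnC ai c +
         ((if pvEdgeB rows cols (i, j) && (c.2 == ai) then (1 : Int) else 0) +
          (if pvCornerB rows cols (i, j) && (c.2 == ai) then (2 : Int) else 0))) := by
  simp only [pvSgnC, pvEdgeB, pvCornerB, Bool.and_eq_true, Bool.or_eq_true,
    beq_iff_eq, decide_eq_true_eq]
  split_ifs <;> omega

theorem pv_edgeB_bounds (rows cols : Int) (p : Int × Int) (hr : 1 ≤ rows) (hc : 1 ≤ cols)
    (h : pvEdgeB rows cols p = true) :
    (0 ≤ p.1 ∧ p.1 < rows) ∧ (0 ≤ p.2 ∧ p.2 < cols) := by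
  simp only [pvEdgeB, Bool.or_eq_true, Bool.and_eq_true, beq_iff_eq, decide_eq_true_eq] at h
  omega

theorem pv_cornerB_bounds (rows cols : Int) (p : Int × Int) (hr : 1 ≤ rows) (hc : 1 ≤ cols)
    (h : pvCornerB rows cols p = true) :
    (0 ≤ p.1 ∧ p.1 < rows) ∧ (0 ≤ p.2 ∧ p.2 < cols) := by
  simp only [pvCornerB, Bool.or_eq_true, Bool.and_eq_true, beq_iff_eq] at h
  omega

-- reading a prefix of a row by index
theorem pv_map_range_getD {α : Type} (xs : List α) (k : Nat) (d : α) (h : k ≤ xs.length) :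
    (List.range k).map (fun m => xs.getD m d) = xs.take k := by
  apply List.ext_getElem
  · simp [h]
  · intro n h1 h2
    simp only [List.length_map, List.length_range] at h1
    simp [List.getD_eq_getElem?_getD, List.getElem?_eq_getElem (by omega : n < xs.length),
      List.getElem_take]

theorem pv_sum_grid (rows cols : Int) (h : Int × Int → Int) :
    ((pvGrid rows cols).map h).sum
      = ((PySem.List.pyRange 0 rows).map (fun i =>
          ((PySem.List.pyRange 0 cols).map (fun j => h (i, j))).sum)).sum := by
  rw [pvGrid, pv_sum_map_flatMap]
  simp [List.map_map, Function.comp_def]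

-- ===== the two sides, reduced to sums over the grid =====

theorem pv_A_eq_sum (board : List (List (Int × Int))) (ai : Int) :
    heuristic_7 board ai =
      ((pvGrid (PySem.List.len board) (PySem.List.len (PySem.List.pyGetD board 0 []))).map
        (fun p => pvSgnC ai (pvCell board p))).sum +
      ((pvGrid (PySem.List.len board) (PySem.List.len (PySem.List.pyGetD board 0 []))).map
        (fun p => if pvEdgeB (PySem.List.len board) (PySem.List.len (PySem.List.pyGetD board 0 [])) p && ((pvCell board p).2 == ai) then (1 : Int) else 0)).sum +
      ((pvGrid (PySem.List.len board) (PySem.List.len (PySem.List.pyGetD board 0 []))).map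
        (fun p => if pvCornerB (PySem.List.len board) (PySem.List.len (PySem.List.pyGetD board 0 [])) p && ((pvCell board p).2 == ai) then (2 : Int) else 0)).sum := by
  simp only [heuristic_7]
  rw [pv_edge_cells_eq]
  set rows := PySem.List.len board with hrows
  set cols := PySem.List.len (PySem.List.pyGetD board 0 []) with hcols
  have hin : ∀ (i acc : Int),
      (PySem.List.pyRange 0 cols).foldl (fun score j =>
        if (PySem.List.pyGetD (PySem.List.pyGetD board i []) j (0, 0)).2 = ai then
          if (i, j) ∈ pvEdgeList rows cols then
            score + (PySem.List.pyGetD (PySem.List.pyGetD board i []) j (0, 0)).1 + 1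
          else if (i, j) ∈ ([(0, 0), (0, cols - 1), (rows - 1, 0), (rows - 1, cols - 1)] : List (Int × Int)) then
            score + (PySem.List.pyGetD (PySem.List.pyGetD board i []) j (0, 0)).1 + 2
          else score + (PySem.List.pyGetD (PySem.List.pyGetD board i []) j (0, 0)).1
        else if (PySem.List.pyGetD (PySem.List.pyGetD board i []) j (0, 0)).2 ≠ 0 ∧
                (PySem.List.pyGetD (PySem.List.pyGetD board i []) j (0, 0)).2 ≠ ai then
          score - (PySem.List.pyGetD (PySem.List.pyGetD board i []) j (0, 0)).1
        else score) acc
      = acc + ((PySem.List.pyRange 0 cols).map (fun j =>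
          pvSgnC ai (pvCell board (i, j)) +
          ((if pvEdgeB rows cols (i, j) && ((pvCell board (i, j)).2 == ai) then (1 : Int) else 0) +
           (if pvCornerB rows cols (i, j) && ((pvCell board (i, j)).2 == ai) then (2 : Int) else 0)))).sum := by
    intro i acc
    refine Eq.trans (PySem.List.foldl_congr_mem _ _ _ _ ?_) (PySem.List.foldl_add _ _ _)
    intro s j _
    simp only [pv_mem_edgeList, pv_mem_cornerList]
    exact pv_cellA rows cols ai i j s (pvCell board (i, j))
  rw [Eq.trans (PySem.List.foldl_congr_mem _ _ _ _ (fun acc i _ => hin i acc))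
    (PySem.List.foldl_add _ _ _), zero_add]
  rw [pv_sum_grid, pv_sum_grid, pv_sum_grid, ← PySem.List.sum_map_add_int, ← PySem.List.sum_map_add_int]
  refine congrArg List.sum (List.map_congr_left fun i _ => ?_)
  rw [PySem.List.sum_map_add_int, PySem.List.sum_map_add_int, ← add_assoc]

theorem pv_B_eq_sum (board : List (List (Int × Int))) (ai : Int)
    (hne : board ≠ []) (hlen : ∀ row ∈ board, (board.headD []).length ≤ row.length)
    (hcols : PySem.List.len (PySem.List.pyGetD board 0 []) ≠ 0) :
    heuristic_7_alt board ai =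
      ((pvGrid (PySem.List.len board) (PySem.List.len (PySem.List.pyGetD board 0 []))).map
        (fun p => pvSgnC ai (pvCell board p))).sum +
      ((pvGrid (PySem.List.len board) (PySem.List.len (PySem.List.pyGetD board 0 []))).map
        (fun p => if pvEdgeB (PySem.List.len board) (PySem.List.len (PySem.List.pyGetD board 0 [])) p && ((pvCell board p).2 == ai) then (1 : Int) else 0)).sum +
      ((pvGrid (PySem.List.len board) (PySem.List.len (PySem.List.pyGetD board 0 []))).map
        (fun p => if pvCornerB (PySem.List.len board) (PySem.List.len (PySem.List.pyGetD board 0 [])) p && ((pvCell board p).2 == ai) then (2 : Int) else 0)).sum := by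
  have h0 : 0 < board.length := by
    cases board with
    | nil => exact absurd rfl hne
    | cons a l => simp
  simp only [heuristic_7_alt]
  rw [if_neg hcols]
  set rows := PySem.List.len board with hrows
  set cols := PySem.List.len (PySem.List.pyGetD board 0 []) with hcolsdef
  have hrowsN : rows = (board.length : Int) := by simp [hrows, PySem.List.len]
  have hcolsN : cols = ((PySem.List.pyGetD board 0 []).length : Int) := by
    simp [hcolsdef, PySem.List.len]
  have hc0 : 0 ≤ cols := by omega
  have hr1 : 1 ≤ rows := by omega
  have hc1 : 1 ≤ cols := by omega
  have hcolsTN : cols = ((cols.toNat : Nat) : Int) := (Int.toNat_of_nonneg hc0).symm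
  have hhead : PySem.List.pyGetD board 0 [] = board.headD [] := by
    rw [PySem.List.pyGetD_eq_getElem board [] (by omega) (by exact_mod_cast h0)]
    cases board with
    | nil => simp at h0
    | cons a l => simp
  have hrowlen : ∀ row ∈ board, cols.toNat ≤ row.length := by
    intro row hr
    have := hlen row hr
    rw [← hhead] at this
    omega
  -- the inner j-loop of any pass reads exactly the first cols entries of its row
  have hrowread : ∀ (i : Int), 0 ≤ i → i < rows → ∀ (f : (Int × Int) → Int),
      (PySem.List.pyRange 0 cols).map (fun j => f (pvCell board (i, j)))
        = ((PySem.List.pyGetD board i []).take cols.toNat).map f := by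
    intro i h1 h2 f
    have hrowmem : PySem.List.pyGetD board i [] ∈ board := by
      rw [PySem.List.pyGetD_eq_getElem board [] h1 (by omega)]
      exact List.getElem_mem _
    have hk : cols.toNat ≤ (PySem.List.pyGetD board i []).length :=
      hrowlen _ hrowmem
    rw [← pv_map_range_getD _ cols.toNat (0, 0) hk, List.map_map]
    rw [hcolsTN, PySem.List.pyRange_zero_natCast, List.map_map]
    refine List.map_congr_left fun m _ => ?_
    simp [pvCell, PySem.List.pyGetD_natCast]
  -- Pass 1 (base) equals the grid sum of the signed counts
  have hbase : board.foldl (fun base row =>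
        (PySem.List.slice row none (some cols)).foldl (fun base c =>
          if c.2 = ai then base + c.1
          else if c.2 ≠ 0 then base - c.1
          else base) base) 0
      = ((pvGrid rows cols).map (fun p => pvSgnC ai (pvCell board p))).sum := by
    have hrow : ∀ (b : Int), ∀ row ∈ board,
        (PySem.List.slice row none (some cols)).foldl (fun b c =>
          if c.2 = ai then b + c.1
          else if c.2 ≠ 0 then b - c.1
          else b) b
        = b + ((row.take cols.toNat).map (pvSgnC ai)).sum := by
      intro b row _
      rw [PySem.List.slice_to row hc0]
      refine Eq.trans (PySem.List.foldl_congr_mem _ _ _ _ ?_) (PySem.List.foldl_add _ _ _)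
      intro b c _
      simp only [pvSgnC]
      split_ifs <;> omega
    rw [Eq.trans (PySem.List.foldl_congr_mem _ _ _ _ hrow) (PySem.List.foldl_add _ _ _),
      zero_add, pv_sum_grid]
    have h1 : (PySem.List.pyRange 0 rows).map (fun i =>
          ((PySem.List.pyRange 0 cols).map (fun j => pvSgnC ai (pvCell board (i, j)))).sum)
        = (PySem.List.pyRange 0 rows).map (fun i =>
            (((PySem.List.pyGetD board i []).take cols.toNat).map (pvSgnC ai)).sum) := by
      refine List.map_congr_left fun i hi => ?_
      rw [PySem.List.mem_pyRange_one] at hi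
      rw [hrowread i hi.1 hi.2 (pvSgnC ai)]
    rw [h1]
    conv_lhs => rw [← PySem.List.map_pyGetD_pyRange_zero' board ([] : List (Int × Int)),
      List.map_map]
    rw [← hrowsN]
    exact congrArg List.sum (List.map_congr_left fun i _ => rfl)
  -- Pass 2: the edge set is A's flattened edge list, deduplicated
  have hedges : (PySem.List.pyRange 1 (rows - 1)).foldl
        (fun s i => PySem.Set.add (PySem.Set.add s (i, (0 : Int))) (i, cols - 1))
        ((PySem.List.pyRange 1 (cols - 1)).foldl
          (fun s j => PySem.Set.add (PySem.Set.add s ((0 : Int), j)) (rows - 1, j))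
          PySem.Set.empty)
      = PySem.Set.ofList (pvEdgeList rows cols) := by
    rw [pv_foldl_add2_eq_update, pv_foldl_add2_eq_update, ← PySem.Set.update_append,
      PySem.Set.update_empty, pvEdgeList]
  -- a boundary-set pass equals the grid sum gated by the matching boundary predicate
  have hpass : ∀ (P : Int × Int → Bool) (S : List (Int × Int)) (w : Int), S.Nodup →
      (∀ p, p ∈ S ↔ P p = true) →
      (∀ p, P p = true → (0 ≤ p.1 ∧ p.1 < rows) ∧ (0 ≤ p.2 ∧ p.2 < cols)) →
      S.foldl (fun b p =>
        if (PySem.List.pyGetD (PySem.List.pyGetD board p.1 []) p.2 (0, 0)).2 = ai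
        then b + w else b) 0
      = ((pvGrid rows cols).map
          (fun p => if P p && ((pvCell board p).2 == ai) then w else 0)).sum := by
    intro P S w hnd hmem hbnd
    have hfold : S.foldl (fun b p =>
          if (PySem.List.pyGetD (PySem.List.pyGetD board p.1 []) p.2 (0, 0)).2 = ai
          then b + w else b) 0
        = (S.map (fun p => if ((pvCell board p).2 == ai) = true then w else 0)).sum := by
      rw [Eq.trans (PySem.List.foldl_congr_mem _ _ _ _ ?_) (PySem.List.foldl_add _ _ _),
        zero_add]
      intro b p _
      simp only [pvCell, beq_iff_eq]
      split_ifs <;> omega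
    rw [hfold]
    have hsplit : ∀ p : Int × Int,
        (if P p && ((pvCell board p).2 == ai) then w else (0 : Int))
          = if P p = true then (if ((pvCell board p).2 == ai) = true then w else 0) else 0 := by
      intro p
      cases hP : P p <;> simp
    calc (S.map (fun p => if ((pvCell board p).2 == ai) = true then w else 0)).sum
        = (((pvGrid rows cols).filter P).map
            (fun p => if ((pvCell board p).2 == ai) = true then w else 0)).sum :=
          (pv_sum_grid_filter_eq P S hnd
            (fun p => by rw [hmem]; exact ⟨fun h => ⟨hbnd p h, h⟩, fun h => h.2⟩) _).symm
      _ = ((pvGrid rows cols).map (fun p =>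
            if P p then (if ((pvCell board p).2 == ai) = true then w else 0) else 0)).sum :=
          (pv_sum_map_if_filter _ _ _).symm
      _ = ((pvGrid rows cols).map
            (fun p => if P p && ((pvCell board p).2 == ai) then w else 0)).sum :=
          congrArg List.sum (List.map_congr_left fun p _ => (hsplit p).symm)
  have hE := hpass (pvEdgeB rows cols) (PySem.Set.ofList (pvEdgeList rows cols)) 1
    (PySem.Set.nodup_ofList _)
    (fun p => by
      rw [PySem.Set.mem_ofList]
      obtain ⟨i, j⟩ := p
      exact pv_mem_edgeList rows cols i j)
    (fun p => pv_edgeB_bounds rows cols p hr1 hc1)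
  have hC := hpass (pvCornerB rows cols)
    (PySem.Set.ofList [((0 : Int), (0 : Int)), (0, cols - 1), (rows - 1, 0), (rows - 1, cols - 1)]) 2
    (PySem.Set.nodup_ofList _)
    (fun p => by
      rw [PySem.Set.mem_ofList]
      obtain ⟨i, j⟩ := p
      exact pv_mem_cornerList rows cols i j)
    (fun p => pv_cornerB_bounds rows cols p hr1 hc1)
  rw [hbase, hedges, hE, hC, ← add_assoc]

theorem pv_main (board : List (List (Int × Int))) (ai : Int)
    (hne : board ≠ []) (hlen : ∀ row ∈ board, (board.headD []).length ≤ row.length) :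
    heuristic_7 board ai = heuristic_7_alt board ai := by
  by_cases hcols : PySem.List.len (PySem.List.pyGetD board 0 []) = 0
  · -- zero-column board: A's inner loop body never runs; B returns 0 by its guard
    simp only [heuristic_7, heuristic_7_alt, hcols, if_pos,
      PySem.List.pyRange_one_eq_nil (le_refl (0 : Int)), List.foldl_nil,
      PySem.List.foldl_ignore]
  · rw [pv_A_eq_sum, pv_B_eq_sum board ai hne hlen hcols]

-- ===== VERDICT (by name: the statement is the Claim_ definition above) =====
theorem heuristic_7_spec : Claim_equal_heuristic_7 := by
  intro board ai_player _ hpre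
  unfold Spec_heuristic_7
  exact pv_main board ai_player hpre.1 hpre.2
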